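-- pv_equiv track=rewrite | github.com/shankarkrishnamurthy/problem-solving | recover-the-original-array.py | recoverArray
-- ===== SOURCE A (Python) =====
-- def recoverArray(nums):
--     nums.sort()
--     nh = {}
--     [nh.setdefault(nums[i],[]).append(i) for i in range(len(nums))]
--     def check(k,ans):
--         s,vh=set(),{}
--         for i,v in enumerate(nums):
--             v1 = v+2*k
--             vh[v]=vi=vh.get(v,0)
--             vh[v1]=v1i=vh.get(v1,0)
--             if vi >= len(nh[v]) or nh[v][vi] in s: continue
--             if v1 not in nh: return False
--             if v1i >= len(nh[v1]) or nh[v1][v1i] in s: return False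
--             s.add(nh[v][vi])
--             s.add(nh[v1][v1i])
--             vh[v] +=1
--             vh[v1] += 1
--             ans.append(v+k)
--         if len(s) == len(nums): return True
--         return False
--     for i in range(1,(len(nums)//2)+1):
--         k, ans = nums[0] + nums[i], []
--         if (k) % 2 == 1: continue
--         k = k//2 - nums[0]
--         if k < 1: continue
--         if check(k, ans): return ans
-- ===== SOURCE B (Python) =====
-- def recoverArray(nums):
--     # Value-level recurrence on the multiset instead of A's per-element greedy pass.
--     # Sorts nums in place, like A; the equivalence is about the return value.
--     nums.sort()
--     n = len(nums)
--     cnt = {}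
--     for v in nums:
--         cnt[v] = cnt.get(v, 0) + 1
--     vals = list(cnt)  # distinct values, ascending because nums is sorted
--
--     def lows(k):
--         # low[v] = number of copies of v that act as the smaller member of a pair,
--         # determined by the recurrence low[v] = cnt[v] - low[v - 2k].
--         low = {}
--         ans = []
--         for v in vals:
--             lv = cnt[v] - low.get(v - 2 * k, 0)
--             if lv < 0 or (lv > 0 and v + 2 * k not in cnt):
--                 return None
--             low[v] = lv
--             ans.extend([v + k] * lv)
--         return ans
--
--     # one candidate k per distinct value whose first position is within 1..n//2
--     pos = 0
--     for v in vals: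
--         if pos > n // 2:
--             break
--         d = v - nums[0]
--         pos += cnt[v]
--         if d % 2 == 1 or d < 2:
--             continue
--         ans = lows(d // 2)
--         if ans is not None:
--             return ans
--     return None
-- ===== Notes on version B (the rewrite author's own statement) =====
-- stated objective: alternative
-- what changed: A's per-element greedy pass with a value-to-index-list dict, per-value cursors and a used-index set is replaced by a value-level recurrence low[v] = cnt[v] - low[v-2k] over the distinct sorted values (one counting dict built once, no element-by-element consumption), and the candidate loop tries each distinct value once via run positions with an early break instead of re-trying every index 1..n//2.
import Mathlib
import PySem

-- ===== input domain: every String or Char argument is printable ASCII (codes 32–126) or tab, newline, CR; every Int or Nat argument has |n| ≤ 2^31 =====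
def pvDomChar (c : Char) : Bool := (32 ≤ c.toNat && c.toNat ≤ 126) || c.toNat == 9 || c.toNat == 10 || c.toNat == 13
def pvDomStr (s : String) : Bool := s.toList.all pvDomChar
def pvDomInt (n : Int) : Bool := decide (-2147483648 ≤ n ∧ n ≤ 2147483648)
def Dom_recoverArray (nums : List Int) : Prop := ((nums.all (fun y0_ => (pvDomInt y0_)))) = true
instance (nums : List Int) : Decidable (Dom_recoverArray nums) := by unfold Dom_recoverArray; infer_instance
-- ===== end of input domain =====

-- B replaces A's per-element greedy pass (value→index-list dict, per-value cursors, used-index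
-- set) by a value-level recurrence low[v] = cnt[v] - low[v-2k] over the distinct sorted values,
-- and tries each candidate k once (deduplicated by runs) instead of once per index 1..n//2.
-- Both A and B sort the caller's list in place (same side effect); the theorems are about the return value.

-- ===== PORT A =====
-- nh = {}; [nh.setdefault(nums[i],[]).append(i) for i in range(len(nums))]
def pvBuildNh (L : List Int) : PySem.Dict Int (List Int) :=
  (PySem.List.enumerate L).foldl (fun d p => d.modify p.2 [] (· ++ [p.1])) PySem.Dict.empty

-- the body of A's check: loop over enumerate(nums) with state (s, vh, ans), then len(s)==len(nums).
-- nh[v] is ported as nh.getD v [] — the key is always present (v is an element of nums).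
def pvCheckA (L : List Int) (nh : PySem.Dict Int (List Int)) (k : Int) :
    List (Int × Int) → PySem.Set Int → PySem.Dict Int Int → List Int → Option (List Int)
  | [], s, _vh, ans => if PySem.Set.len s = L.length then some ans else none
  | (_, v) :: rest, s, vh, ans =>
    let v1 := v + 2 * k
    let vi := vh.getD v 0
    let vh1 := vh.insert v vi
    let v1i := vh1.getD v1 0
    let vh2 := vh1.insert v1 v1i
    let lv := nh.getD v []
    if vi ≥ (lv.length : Int) ∨ PySem.List.pyGetD lv vi 0 ∈ s then
      pvCheckA L nh k rest s vh2 ans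
    else if nh.contains v1 = false then none
    else
      let lv1 := nh.getD v1 []
      if v1i ≥ (lv1.length : Int) ∨ PySem.List.pyGetD lv1 v1i 0 ∈ s then none
      else
        let s1 := PySem.Set.add (PySem.Set.add s (PySem.List.pyGetD lv vi 0)) (PySem.List.pyGetD lv1 v1i 0)
        let vh3 := vh2.insert v (vh2.getD v 0 + 1)
        let vh4 := vh3.insert v1 (vh3.getD v1 0 + 1)
        pvCheckA L nh k rest s1 vh4 (ans ++ [v + k])

-- the candidate loop over range(1, n//2+1); both subscripts are in range here (pyGetD is their total form)
def pvLoopA (L : List Int) (nh : PySem.Dict Int (List Int)) : List Int → Option (List Int)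
  | [] => none
  | i :: rest =>
    let k0 := PySem.List.pyGetD L 0 0 + PySem.List.pyGetD L i 0
    if PySem.Int.mod k0 2 = 1 then pvLoopA L nh rest
    else
      let k := PySem.Int.floordiv k0 2 - PySem.List.pyGetD L 0 0
      if k < 1 then pvLoopA L nh rest
      else
        match pvCheckA L nh k (PySem.List.enumerate L) PySem.Set.empty PySem.Dict.empty [] with
        | some ans => some ans
        | none => pvLoopA L nh rest

def recoverArray (nums : List Int) : Option (List Int) :=
  let L := PySem.List.sorted nums (fun x => x) false
  pvLoopA L (pvBuildNh L) (PySem.List.pyRange 1 ((L.length / 2 + 1 : Nat) : Int) 1)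

-- ===== PORT B =====
-- B's lows(k): low[v] = cnt[v] - low.get(v-2k, 0); fail on a negative value or a missing partner.
def pvLowsB (cnt : PySem.Dict Int Int) (k : Int) :
    List Int → PySem.Dict Int Int → List Int → Option (List Int)
  | [], _low, ans => some ans
  | v :: rest, low, ans =>
    let lv := cnt.getD v 0 - low.getD (v - 2 * k) 0
    if lv < 0 ∨ (0 < lv ∧ cnt.contains (v + 2 * k) = false) then none
    else pvLowsB cnt k rest (low.insert v lv) (ans ++ List.replicate lv.toNat (v + k))

-- B's candidate loop: one candidate per distinct value, break once its first position passes n//2.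
def pvCandB (L : List Int) (cnt : PySem.Dict Int Int) (vals : List Int) :
    List Int → Int → Option (List Int)
  | [], _pos => none
  | v :: rest, pos =>
    if pos > PySem.Int.floordiv (L.length : Int) 2 then none
    else
      let d := v - PySem.List.pyGetD L 0 0
      let pos' := pos + cnt.getD v 0
      if PySem.Int.mod d 2 = 1 ∨ d < 2 then pvCandB L cnt vals rest pos'
      else
        match pvLowsB cnt (PySem.Int.floordiv d 2) vals PySem.Dict.empty [] with
        | some a => some a
        | none => pvCandB L cnt vals rest pos'

def recoverArray_alt (nums : List Int) : Option (List Int) :=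
  let L := PySem.List.sorted nums (fun x => x) false
  let cnt := L.foldl (fun d v => d.insert v (d.getD v 0 + 1)) PySem.Dict.empty
  pvCandB L cnt cnt.keys cnt.keys 0

-- ===== PRECONDITION & SPEC =====
def Spec_recoverArray (nums : List Int) (out : Option (List Int)) : Prop := out = recoverArray_alt nums
instance (nums : List Int) (out : Option (List Int)) : Decidable (Spec_recoverArray nums out) := by unfold Spec_recoverArray; infer_instance

-- ===== CLAIM (what is proved, stated in full; the proofs are below) =====
def Claim_equal_recoverArray : Prop := ∀ (nums : List Int), Dom_recoverArray nums → Spec_recoverArray nums (recoverArray nums)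

-- ===== LEMMAS AND PROOFS =====

-- proof-internal reformulation of A's check as a greedy pass over a multiset counter
def pvCheckB (L : List Int) (k : Int) :
    List Int → PySem.Dict Int Int → List Int → Option (List Int)
  | [], _cnt, ans => if 2 * ans.length = L.length then some ans else none
  | v :: rest, cnt, ans =>
    let c := cnt.getD v 0
    if c = 0 then pvCheckB L k rest cnt ans
    else
      let d := cnt.getD (v + 2 * k) 0
      if d = 0 then none
      else pvCheckB L k rest ((cnt.insert v (c - 1)).insert (v + 2 * k) (d - 1)) (ans ++ [v + k])

-- proof-internal reformulation of A's candidate loop driving pvCheckB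
def pvLoopB (L : List Int) : List Int → Option (List Int)
  | [] => none
  | i :: rest =>
    let d := PySem.List.pyGetD L i 0 - PySem.List.pyGetD L 0 0
    if PySem.Int.mod d 2 = 1 ∨ d < 2 then pvLoopB L rest
    else
      match pvCheckB L (PySem.Int.floordiv d 2) L (PySem.Dict.counter L) [] with
      | some ans => some ans
      | none => pvLoopB L rest

-- the index list nh[v]: positions of v in L, in increasing order
def pvOcc (L : List Int) (v : Int) : List Int :=
  ((PySem.List.enumerate L).filter (fun p => p.2 == v)).map (·.1)

theorem pvFoldSwap (l : List (Int × Int)) (d : PySem.Dict Int (List Int)) :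
    l.foldl (fun d p => d.modify p.2 [] (· ++ [p.1])) d
      = (l.map (fun p => (p.2, p.1))).foldl (fun d q => d.modify q.1 [] (· ++ [q.2])) d := by
  induction l generalizing d with
  | nil => rfl
  | cons a t ih => simp only [List.map_cons, List.foldl_cons]; exact ih _

theorem pvBuildNh_getD (L : List Int) (v : Int) :
    (pvBuildNh L).getD v [] = pvOcc L v := by
  unfold pvBuildNh pvOcc
  rw [pvFoldSwap]
  rw [PySem.Dict.getD_foldl_modify_append]
  simp [List.filter_map, Function.comp_def]

theorem pvBuildNh_contains (L : List Int) (v : Int) :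
    (pvBuildNh L).contains v = true ↔ v ∈ L := by
  unfold pvBuildNh
  rw [PySem.Dict.contains_iff_mem_keys,
      PySem.Dict.keys_foldl_modify_key (PySem.List.enumerate L) (fun p => p.2) []
        (fun _ p v => v ++ [p.1]) PySem.Dict.empty]
  simp [PySem.Dict.keys_empty, PySem.Set.update_nil_left, PySem.Set.mem_ofList,
        PySem.List.map_snd_enumerate]

theorem pvOcc_length (L : List Int) (v : Int) : (pvOcc L v).length = L.count v := by
  unfold pvOcc
  rw [List.length_map, ← List.countP_eq_length_filter]
  have : L.count v = ((PySem.List.enumerate L).map (·.2)).count v := by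
    rw [PySem.List.map_snd_enumerate]
  rw [this, List.count_eq_countP, List.countP_map]
  rfl

theorem pvOcc_mem (L : List Int) (v e : Int) :
    e ∈ pvOcc L v ↔ ∃ (kn : Nat) (h : kn < L.length), e = (kn : Int) ∧ L[kn] = v := by
  unfold pvOcc
  simp only [List.mem_map, List.mem_filter, PySem.List.mem_enumerate_iff]
  constructor
  · rintro ⟨p, ⟨⟨kn, h, rfl⟩, hv⟩, rfl⟩
    exact ⟨kn, h, by simpa using hv.symm ▸ rfl, by simpa using (beq_iff_eq.mp hv)⟩
  · rintro ⟨kn, h, rfl, hv⟩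
    exact ⟨((kn : Int), L[kn]), ⟨⟨kn, h, by simp⟩, by simp [hv]⟩, rfl⟩

theorem pvOcc_nodup (L : List Int) (v : Int) : (pvOcc L v).Nodup := by
  unfold pvOcc
  have hp := PySem.List.pairwise_lt_enumerate (xs := L) (s := 0)
  have := (hp.filter (fun p => p.2 == v))
  have hm : (((PySem.List.enumerate L).filter (fun p => p.2 == v)).map (·.1)).Pairwise (· < ·) := by
    rw [List.pairwise_map]; exact this
  exact hm.imp (fun h => ne_of_lt h)

theorem pvOcc_inj (L : List Int) {v w e : Int} {j j' : Nat}
    (hv : (pvOcc L v)[j]? = some e) (hw : (pvOcc L w)[j']? = some e) : v = w ∧ j = j' := by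
  have hev : e ∈ pvOcc L v := List.mem_of_getElem? hv
  have hew : e ∈ pvOcc L w := List.mem_of_getElem? hw
  rw [pvOcc_mem] at hev hew
  obtain ⟨kn, hk, rfl, hLv⟩ := hev
  obtain ⟨kn', hk', he, hLw⟩ := hew
  have hkk : kn = kn' := by exact_mod_cast he
  subst hkk
  have hvw : v = w := by rw [← hLv, hLw]
  subst hvw
  refine ⟨rfl, ?_⟩
  have hj : j < (pvOcc L v).length := (List.getElem?_eq_some_iff.mp hv).1
  exact List.getElem?_inj hj (pvOcc_nodup L v) (hv.trans hw.symm)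

-- the simulation invariant between A's state (s, vh, ans) and the counter state (cnt, ans)
def pvInv (L : List Int) (s : PySem.Set Int) (vh cnt : PySem.Dict Int Int) (ans : List Int) : Prop :=
  (∀ v, 0 ≤ vh.getD v 0 ∧ vh.getD v 0 ≤ (L.count v : Int)) ∧
  (∀ v, cnt.getD v 0 = (L.count v : Int) - vh.getD v 0) ∧
  (∀ e : Int, e ∈ s ↔ ∃ v : Int, ∃ j : Nat, (j : Int) < vh.getD v 0 ∧ (pvOcc L v)[j]? = some e) ∧
  s.Nodup ∧ s.length = 2 * ans.length

theorem pvInv_getD_congr (L : List Int) (s : PySem.Set Int) (vh vh' cnt : PySem.Dict Int Int)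
    (ans : List Int) (h : ∀ w, vh'.getD w 0 = vh.getD w 0) :
    pvInv L s vh cnt ans → pvInv L s vh' cnt ans := by
  unfold pvInv; simp only [h]; exact id

theorem pvCheck_eq (L : List Int) (k : Int) (hk : k ≠ 0) :
    ∀ (rest : List (Int × Int)) (s : PySem.Set Int) (vh cnt : PySem.Dict Int Int) (ans : List Int),
      (∀ p ∈ rest, p.2 ∈ L) → pvInv L s vh cnt ans →
      pvCheckA L (pvBuildNh L) k rest s vh ans = pvCheckB L k (rest.map (·.2)) cnt ans := by
  intro rest
  induction rest with
  | nil =>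
    intro s vh cnt ans _ hInv
    obtain ⟨_, _, _, _, I5⟩ := hInv
    simp only [pvCheckA, pvCheckB, List.map_nil, PySem.Set.len]
    have hAB : ((List.length s : Int) = (L.length : Int)) ↔ 2 * ans.length = L.length := by
      rw [Nat.cast_inj, I5]
    by_cases hc : 2 * ans.length = L.length
    · rw [if_pos (hAB.mpr hc), if_pos hc]
    · rw [if_neg (fun h => hc (hAB.mp h)), if_neg hc]
  | cons head rest ih =>
    obtain ⟨i, v⟩ := head
    intro s vh cnt ans hmem hInv
    have hvL : v ∈ L := hmem (i, v) (by simp)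
    have hrest : ∀ p ∈ rest, p.2 ∈ L := fun p hp => hmem p (by simp [hp])
    obtain ⟨I1, I2, I3, I4, I5⟩ := hInv
    have hne : v + 2 * k ≠ v := fun h => hk (by omega)
    have hne' : v ≠ v + 2 * k := fun h => hk (by omega)
    have hc0 : 0 ≤ vh.getD v 0 := (I1 v).1
    have hcle : vh.getD v 0 ≤ (L.count v : Int) := (I1 v).2
    have hc10 : 0 ≤ vh.getD (v + 2 * k) 0 := (I1 (v + 2 * k)).1
    have hc1le : vh.getD (v + 2 * k) 0 ≤ (L.count (v + 2 * k) : Int) := (I1 (v + 2 * k)).2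
    have hIv := I2 v
    have hIv1 := I2 (v + 2 * k)
    have hvh2 : ∀ w, ((vh.insert v (vh.getD v 0)).insert (v + 2 * k)
        (vh.getD (v + 2 * k) 0)).getD w 0 = vh.getD w 0 := by
      intro w; simp only [PySem.Dict.getD_insert]; split_ifs <;> simp_all
    simp only [pvCheckB, List.map_cons, pvCheckA, pvBuildNh_getD,
               PySem.Dict.getD_insert, if_neg hne, if_neg hne', if_true]
    by_cases hcc : cnt.getD v 0 = 0
    · -- v exhausted: A skips via the first disjunct, the counter pass skips via c == 0
      have hge : vh.getD v 0 ≥ ((pvOcc L v).length : Int) := by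
        rw [pvOcc_length]; omega
      rw [if_pos (Or.inl hge), if_pos hcc]
      exact ih s _ cnt ans hrest
        (pvInv_getD_congr L s vh _ cnt ans hvh2 ⟨I1, I2, I3, I4, I5⟩)
    · -- v still available
      have hlt : vh.getD v 0 < (L.count v : Int) := by omega
      have hjcast : ((vh.getD v 0).toNat : Int) = vh.getD v 0 := Int.toNat_of_nonneg hc0
      have hjlt : (vh.getD v 0).toNat < (pvOcc L v).length := by rw [pvOcc_length]; omega
      have hget : PySem.List.pyGetD (pvOcc L v) (vh.getD v 0) 0
          = (pvOcc L v)[(vh.getD v 0).toNat] := by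
        have h1 := PySem.List.pyGetD_natCast (pvOcc L v) (vh.getD v 0).toNat (0 : Int)
        rw [hjcast] at h1
        rw [h1, List.getD_eq_getElem _ _ hjlt]
      have he1some : (pvOcc L v)[(vh.getD v 0).toNat]? = some ((pvOcc L v)[(vh.getD v 0).toNat]) :=
        List.getElem?_eq_getElem hjlt
      have he1ns : (pvOcc L v)[(vh.getD v 0).toNat] ∉ s := by
        intro hm; rw [I3] at hm
        obtain ⟨w, j', hj', hx⟩ := hm
        obtain ⟨rfl, rfl⟩ := pvOcc_inj L hx he1some
        omega
      have hcondA : ¬ (vh.getD v 0 ≥ ((pvOcc L v).length : Int)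
          ∨ PySem.List.pyGetD (pvOcc L v) (vh.getD v 0) 0 ∈ s) := by
        rw [pvOcc_length, hget]; push_neg; exact ⟨by omega, he1ns⟩
      rw [if_neg hcondA, if_neg hcc]
      by_cases hv1 : (v + 2 * k) ∈ L
      · have hcb : (pvBuildNh L).contains (v + 2 * k) = true := (pvBuildNh_contains L _).mpr hv1
        rw [if_neg (by simp [hcb])]
        by_cases hdd : cnt.getD (v + 2 * k) 0 = 0
        · -- partner exhausted: A fails on the cursor test, the counter pass on d == 0
          have hge1 : vh.getD (v + 2 * k) 0 ≥ ((pvOcc L (v + 2 * k)).length : Int) := by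
            rw [pvOcc_length]; omega
          rw [if_pos (Or.inl hge1), if_pos hdd]
        · -- success step on both sides
          have hlt1 : vh.getD (v + 2 * k) 0 < (L.count (v + 2 * k) : Int) := by omega
          have hj1cast : ((vh.getD (v + 2 * k) 0).toNat : Int) = vh.getD (v + 2 * k) 0 :=
            Int.toNat_of_nonneg hc10
          have hj1lt : (vh.getD (v + 2 * k) 0).toNat < (pvOcc L (v + 2 * k)).length := by
            rw [pvOcc_length]; omega
          have hget1 : PySem.List.pyGetD (pvOcc L (v + 2 * k)) (vh.getD (v + 2 * k) 0) 0
              = (pvOcc L (v + 2 * k))[(vh.getD (v + 2 * k) 0).toNat] := by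
            have h1 := PySem.List.pyGetD_natCast (pvOcc L (v + 2 * k)) (vh.getD (v + 2 * k) 0).toNat (0 : Int)
            rw [hj1cast] at h1
            rw [h1, List.getD_eq_getElem _ _ hj1lt]
          have he2some : (pvOcc L (v + 2 * k))[(vh.getD (v + 2 * k) 0).toNat]?
              = some ((pvOcc L (v + 2 * k))[(vh.getD (v + 2 * k) 0).toNat]) :=
            List.getElem?_eq_getElem hj1lt
          have he2ns : (pvOcc L (v + 2 * k))[(vh.getD (v + 2 * k) 0).toNat] ∉ s := by
            intro hm; rw [I3] at hm
            obtain ⟨w, j', hj', hx⟩ := hm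
            obtain ⟨rfl, rfl⟩ := pvOcc_inj L hx he2some
            omega
          have he12 : (pvOcc L v)[(vh.getD v 0).toNat]
              ≠ (pvOcc L (v + 2 * k))[(vh.getD (v + 2 * k) 0).toNat] := by
            intro h
            have := pvOcc_inj L (h ▸ he1some) he2some
            exact hne' this.1
          have hcondA1 : ¬ (vh.getD (v + 2 * k) 0 ≥ ((pvOcc L (v + 2 * k)).length : Int)
              ∨ PySem.List.pyGetD (pvOcc L (v + 2 * k)) (vh.getD (v + 2 * k) 0) 0 ∈ s) := by
            rw [pvOcc_length, hget1]; push_neg; exact ⟨by omega, he2ns⟩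
          rw [if_neg hcondA1, if_neg hdd]
          rw [hget, hget1]
          -- the new states
          refine ih _ _ _ _ hrest ?_
          have hvh4 : ∀ w, ((((vh.insert v (vh.getD v 0)).insert (v + 2 * k)
              (vh.getD (v + 2 * k) 0)).insert v (vh.getD v 0 + 1)).insert (v + 2 * k)
              (vh.getD (v + 2 * k) 0 + 1)).getD w 0
              = if w = v + 2 * k then vh.getD (v + 2 * k) 0 + 1
                else if w = v then vh.getD v 0 + 1 else vh.getD w 0 := by
            intro w; simp only [PySem.Dict.getD_insert]; split_ifs <;> simp_all
          have hcnt4 : ∀ w, ((cnt.insert v (cnt.getD v 0 - 1)).insert (v + 2 * k)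
              (cnt.getD (v + 2 * k) 0 - 1)).getD w 0
              = if w = v + 2 * k then cnt.getD (v + 2 * k) 0 - 1
                else if w = v then cnt.getD v 0 - 1 else cnt.getD w 0 := by
            intro w; simp only [PySem.Dict.getD_insert]
          have hs1 : PySem.Set.add (PySem.Set.add s ((pvOcc L v)[(vh.getD v 0).toNat]))
                ((pvOcc L (v + 2 * k))[(vh.getD (v + 2 * k) 0).toNat])
              = s ++ [(pvOcc L v)[(vh.getD v 0).toNat]]
                ++ [(pvOcc L (v + 2 * k))[(vh.getD (v + 2 * k) 0).toNat]] := by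
            rw [PySem.Set.add_of_not_mem he1ns, PySem.Set.add_of_not_mem (by
              simp only [List.mem_append, List.mem_singleton]
              rintro (h | h); exacts [he2ns h, he12 h.symm])]
          refine ⟨?_, ?_, ?_, ?_, ?_⟩
          · intro w; rw [hvh4]; split_ifs with h1 h2
            · subst h1; omega
            · subst h2; omega
            · exact I1 w
          · intro w; rw [hvh4, hcnt4]; split_ifs with h1 h2
            · subst h1; omega
            · subst h2; omega
            · exact I2 w
          · intro e
            rw [hs1]
            simp only [List.mem_append, List.mem_singleton]
            constructor
            · rintro ((he | rfl) | rfl)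
              · obtain ⟨w, j', hj', hx⟩ := (I3 e).mp he
                refine ⟨w, j', ?_, hx⟩
                rw [hvh4]; split_ifs with h1 h2
                · subst h1; omega
                · subst h2; omega
                · omega
              · exact ⟨v, (vh.getD v 0).toNat, by rw [hvh4, if_neg hne', if_pos rfl]; omega,
                  he1some⟩
              · exact ⟨v + 2 * k, (vh.getD (v + 2 * k) 0).toNat,
                  by rw [hvh4, if_pos rfl]; omega, he2some⟩
            · rintro ⟨w, j', hj', hx⟩
              rw [hvh4] at hj'
              by_cases hw1 : w = v + 2 * k
              · subst hw1; rw [if_pos rfl] at hj'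
                by_cases hj2 : (j' : Int) < vh.getD (v + 2 * k) 0
                · exact Or.inl (Or.inl ((I3 e).mpr ⟨_, j', hj2, hx⟩))
                · have : j' = (vh.getD (v + 2 * k) 0).toNat := by omega
                  subst this
                  exact Or.inr (Option.some_inj.mp (hx.symm.trans he2some))
              · rw [if_neg hw1] at hj'
                by_cases hw : w = v
                · rw [if_pos hw] at hj'; rw [hw] at hx
                  by_cases hj2 : (j' : Int) < vh.getD v 0
                  · exact Or.inl (Or.inl ((I3 e).mpr ⟨_, j', hj2, hx⟩))
                  · have : j' = (vh.getD v 0).toNat := by omega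
                    subst this
                    exact Or.inl (Or.inr (Option.some_inj.mp (hx.symm.trans he1some)))
                · rw [if_neg hw] at hj'
                  exact Or.inl (Or.inl ((I3 e).mpr ⟨w, j', hj', hx⟩))
          · exact PySem.Set.nodup_add _ _ (PySem.Set.nodup_add _ _ I4)
          · rw [hs1]; simp only [List.length_append, List.length_singleton, I5]; omega
      · -- v + 2k not in nums at all: A hits 'v1 not in nh', the counter pass sees count 0
        have hcb : (pvBuildNh L).contains (v + 2 * k) = false := by
          cases h : (pvBuildNh L).contains (v + 2 * k)
          · rfl
          · exact absurd ((pvBuildNh_contains L _).mp h) hv1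
        have hcnt0 : L.count (v + 2 * k) = 0 := List.count_eq_zero.mpr hv1
        have hd0 : cnt.getD (v + 2 * k) 0 = 0 := by
          rw [hcnt0] at hIv1; simp at hIv1; omega
        rw [if_pos (by simp [hcb]), if_pos hd0]

theorem pvLoop_eq (L : List Int) :
    ∀ (is : List Int), pvLoopA L (pvBuildNh L) is = pvLoopB L is := by
  intro is
  induction is with
  | nil => rfl
  | cons i rest ih =>
    simp only [pvLoopA, pvLoopB]
    have h2pos : (0 : Int) < 2 := by norm_num
    have hmm : (PySem.Int.mod (PySem.List.pyGetD L 0 0 + PySem.List.pyGetD L i 0) 2 = 1)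
        ↔ (PySem.Int.mod (PySem.List.pyGetD L i 0 - PySem.List.pyGetD L 0 0) 2 = 1) := by
      rw [PySem.Int.mod_eq_emod_of_pos h2pos, PySem.Int.mod_eq_emod_of_pos h2pos]; omega
    by_cases h1 : PySem.Int.mod (PySem.List.pyGetD L 0 0 + PySem.List.pyGetD L i 0) 2 = 1
    · rw [if_pos h1, if_pos (Or.inl (hmm.mp h1)), ih]
    · have h1' : ¬ PySem.Int.mod (PySem.List.pyGetD L i 0 - PySem.List.pyGetD L 0 0) 2 = 1 :=
        fun h => h1 (hmm.mpr h)
      rw [if_neg h1]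
      have hk_eq : PySem.Int.floordiv (PySem.List.pyGetD L 0 0 + PySem.List.pyGetD L i 0) 2
            - PySem.List.pyGetD L 0 0
          = PySem.Int.floordiv (PySem.List.pyGetD L i 0 - PySem.List.pyGetD L 0 0) 2 := by
        rw [PySem.Int.floordiv_eq_ediv_of_pos h2pos, PySem.Int.floordiv_eq_ediv_of_pos h2pos]
        rw [PySem.Int.mod_eq_emod_of_pos h2pos] at h1
        omega
      by_cases h2 : PySem.List.pyGetD L i 0 - PySem.List.pyGetD L 0 0 < 2
      · rw [if_pos (by
          rw [hk_eq, PySem.Int.floordiv_eq_ediv_of_pos h2pos]; omega),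
          if_pos (Or.inr h2), ih]
      · rw [if_neg (by
          rw [hk_eq, PySem.Int.floordiv_eq_ediv_of_pos h2pos]; omega),
          if_neg (by push_neg; exact ⟨h1', by omega⟩)]
        have hkne : PySem.Int.floordiv (PySem.List.pyGetD L 0 0 + PySem.List.pyGetD L i 0) 2
            - PySem.List.pyGetD L 0 0 ≠ 0 := by
          rw [hk_eq, PySem.Int.floordiv_eq_ediv_of_pos h2pos]; omega
        have hInv0 : pvInv L [] PySem.Dict.empty (PySem.Dict.counter L) [] := by
          refine ⟨fun w => by simp [PySem.Dict.getD_empty],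
                  fun w => by simp [PySem.Dict.getD_empty, PySem.Dict.getD_counter],
                  fun e => ?_, List.nodup_nil, rfl⟩
          simp only [List.not_mem_nil, false_iff, PySem.Dict.getD_empty]
          rintro ⟨w, j, hj, -⟩
          omega
        have hmemE : ∀ p ∈ PySem.List.enumerate L 0, p.2 ∈ L := by
          intro p hp
          rw [PySem.List.mem_enumerate_iff] at hp
          obtain ⟨kk, hkk, rfl⟩ := hp
          exact List.getElem_mem hkk
        have hch := pvCheck_eq L _ hkne (PySem.List.enumerate L) PySem.Set.empty PySem.Dict.empty
          (PySem.Dict.counter L) [] hmemE hInv0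
        rw [PySem.List.map_snd_enumerate] at hch
        rw [hch, hk_eq]
        cases pvCheckB L (PySem.Int.floordiv (PySem.List.pyGetD L i 0 - PySem.List.pyGetD L 0 0) 2)
            L (PySem.Dict.counter L) [] with
        | some a => rfl
        | none => exact ih

-- ===== counter pass = value recurrence =====

theorem pvCheckB_congr (L : List Int) (k : Int) :
    ∀ (xs : List Int) (c c' : PySem.Dict Int Int) (ans : List Int),
      (∀ w, c.getD w 0 = c'.getD w 0) → pvCheckB L k xs c ans = pvCheckB L k xs c' ans := by
  intro xs
  induction xs with
  | nil => intro c c' ans _; rfl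
  | cons v rest ih =>
    intro c c' ans h
    simp only [pvCheckB, h v, h (v + 2 * k)]
    by_cases h0 : c'.getD v 0 = 0
    · rw [if_pos h0, if_pos h0]; exact ih c c' ans h
    · rw [if_neg h0, if_neg h0]
      by_cases h1 : c'.getD (v + 2 * k) 0 = 0
      · rw [if_pos h1, if_pos h1]
      · rw [if_neg h1, if_neg h1]
        refine ih _ _ _ ?_
        intro w
        simp only [PySem.Dict.getD_insert, h v, h (v + 2 * k), h w]

theorem pvCheckB_block (L : List Int) (k v : Int) (rest : List Int) (hvk : v + 2 * k ≠ v) :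
    ∀ (m : Nat) (cnt : PySem.Dict Int Int) (ans : List Int),
      0 ≤ cnt.getD v 0 → cnt.getD v 0 ≤ (m : Int) → 0 ≤ cnt.getD (v + 2 * k) 0 →
      pvCheckB L k (List.replicate m v ++ rest) cnt ans
        = if cnt.getD (v + 2 * k) 0 < cnt.getD v 0 then none
          else pvCheckB L k rest ((cnt.insert v 0).insert (v + 2 * k)
                 (cnt.getD (v + 2 * k) 0 - cnt.getD v 0))
               (ans ++ List.replicate (cnt.getD v 0).toNat (v + k)) := by
  intro m
  induction m with
  | zero =>
    intro cnt ans h0 hm hq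
    have ha : cnt.getD v 0 = 0 := le_antisymm (by exact_mod_cast hm) h0
    rw [ha]
    simp only [List.replicate, List.nil_append, Int.toNat_zero, List.append_nil,
      if_neg (by omega : ¬ cnt.getD (v + 2 * k) 0 < 0), Int.sub_zero]
    refine pvCheckB_congr L k rest _ _ ans ?_
    intro w
    simp only [PySem.Dict.getD_insert]
    split_ifs with h1 h2 <;> simp_all
  | succ m ih =>
    intro cnt ans h0 hm hq
    rw [List.replicate_succ, List.cons_append]
    show pvCheckB L k (v :: (List.replicate m v ++ rest)) cnt ans = _
    simp only [pvCheckB]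
    by_cases ha : cnt.getD v 0 = 0
    · rw [if_pos ha, ih cnt ans h0 (by omega) hq]
    · rw [if_neg ha]
      by_cases hd : cnt.getD (v + 2 * k) 0 = 0
      · rw [if_pos hd, if_pos (by omega)]
      · rw [if_neg hd]
        set a := cnt.getD v 0 with hadef
        set q := cnt.getD (v + 2 * k) 0 with hqdef
        have hga : ((cnt.insert v (a - 1)).insert (v + 2 * k) (q - 1)).getD v 0 = a - 1 := by
          rw [PySem.Dict.getD_insert, if_neg (fun h => hvk h.symm),
              PySem.Dict.getD_insert, if_pos rfl]
        have hgq : ((cnt.insert v (a - 1)).insert (v + 2 * k) (q - 1)).getD (v + 2 * k) 0 = q - 1 := by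
          rw [PySem.Dict.getD_insert, if_pos rfl]
        rw [ih _ _ (by rw [hga]; omega) (by rw [hga]; push_cast; omega) (by rw [hgq]; omega)]
        rw [hga, hgq]
        by_cases hlt : q < a
        · rw [if_pos (by omega), if_pos hlt]
        · rw [if_neg (by omega), if_neg hlt]
          have hrepl : (ans ++ [v + k]) ++ List.replicate (a - 1).toNat (v + k)
              = ans ++ List.replicate a.toNat (v + k) := by
            rw [List.append_assoc]
            congr 1
            have : a.toNat = (a - 1).toNat + 1 := by omega
            rw [this, List.replicate_succ]
            rfl
          rw [hrepl]
          have : q - 1 - (a - 1) = q - a := by ring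
          rw [this]
          refine pvCheckB_congr L k rest _ _ _ ?_
          intro w
          simp only [PySem.Dict.getD_insert]
          split_ifs <;> simp_all

theorem pvSumShift (k v lv : Int) (low : PySem.Dict Int Int) :
    ∀ (t : List Int),
      (t.map (fun w => (low.insert v lv).getD (w - 2 * k) 0)).sum
        = (t.map (fun w => low.getD (w - 2 * k) 0)).sum
          + (t.count (v + 2 * k) : Int) * (lv - low.getD v 0) := by
  intro t
  induction t with
  | nil => simp
  | cons w r ih =>
    rw [List.map_cons, List.map_cons, List.sum_cons, List.sum_cons, ih,
        PySem.Dict.getD_insert]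
    by_cases hw : w = v + 2 * k
    · subst hw
      rw [if_pos (by ring), List.count_cons_self,
          show v + 2 * k - 2 * k = v from by ring]
      generalize (List.map (fun w => low.getD (w - 2 * k) 0) r).sum = S
      push_cast
      ring
    · rw [if_neg (by omega), List.count_cons_of_ne hw]
      generalize (List.map (fun w => low.getD (w - 2 * k) 0) r).sum = S
      ring

theorem pvLowsB_deficit (cnt0 : PySem.Dict Int Int) (k : Int) :
    ∀ (vals' : List Int) (low : PySem.Dict Int Int) (ans : List Int) (w : Int),
      w ∈ vals' → w - 2 * k ∉ vals' → cnt0.getD w 0 < low.getD (w - 2 * k) 0 →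
      pvLowsB cnt0 k vals' low ans = none := by
  intro vals'
  induction vals' with
  | nil => intro _ _ w h; exact absurd h (List.not_mem_nil)
  | cons u r ih =>
    intro low ans w hw hw2 hlt
    by_cases huw : u = w
    · subst huw
      simp only [pvLowsB]
      rw [if_pos (Or.inl (by omega))]
    · have hwr : w ∈ r := by
        rcases List.mem_cons.mp hw with h | h
        · exact absurd h.symm huw
        · exact h
      simp only [pvLowsB]
      split_ifs with hc
      · rfl
      · refine ih _ _ w hwr (fun h => hw2 (List.mem_cons_of_mem _ h)) ?_
        have hu2 : u ≠ w - 2 * k := fun h => hw2 (h ▸ List.mem_cons_self)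
        rw [PySem.Dict.getD_insert, if_neg (fun h => hu2 h.symm)]
        exact hlt

theorem pvMain (L : List Int) (k : Int) (hk : 1 ≤ k) :
    ∀ (vals' : List Int) (cnt low : PySem.Dict Int Int) (ans : List Int),
      vals'.Pairwise (· < ·) →
      (∀ v ∈ vals', v ∈ L) →
      (∀ u, u ∈ L → u ∉ vals' → ∀ w ∈ vals', u < w) →
      (∀ w, cnt.getD w 0 = (L.count w : Int) - low.getD (w - 2 * k) 0 - low.getD w 0) →
      (∀ w, 0 ≤ cnt.getD w 0) →
      (∀ w ∈ vals', low.getD w 0 = 0) →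
      (∀ w, w ∉ L → low.getD w 0 = 0) →
      (∀ w, 0 ≤ low.getD w 0) →
      (2 * (ans.length : Int) = (L.length : Int)
          - ((vals'.flatMap (fun v => List.replicate (L.count v) v)).length : Int)
          + (vals'.map (fun w => low.getD (w - 2 * k) 0)).sum) →
      pvCheckB L k (vals'.flatMap (fun v => List.replicate (L.count v) v)) cnt ans
        = pvLowsB (PySem.Dict.counter L) k vals' low ans := by
  intro vals'
  induction vals' with
  | nil =>
    intro cnt low ans _ _ _ _ _ _ _ _ hlen
    simp only [List.flatMap_nil, List.map_nil, List.sum_nil, List.length_nil] at hlen ⊢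
    simp only [pvCheckB, pvLowsB]
    rw [if_pos (by omega)]
  | cons v rest ih =>
    intro cnt low ans hchain hmem hclosed Hcnt Hpos Hlow0 HlowL Hlownn Hlen
    have hvL : v ∈ L := hmem v List.mem_cons_self
    have hvlt : ∀ w ∈ rest, v < w := (List.pairwise_cons.mp hchain).1
    have hvrest : v ∉ rest := fun h => lt_irrefl v (hvlt v h)
    have hlowv : low.getD v 0 = 0 := Hlow0 v List.mem_cons_self
    have hp0 : 0 ≤ low.getD (v - 2 * k) 0 := Hlownn _
    have hcv : cnt.getD v 0 = (L.count v : Int) - low.getD (v - 2 * k) 0 := by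
      have := Hcnt v; rw [hlowv] at this; omega
    have hl2 : low.getD (v + 2 * k) 0 = 0 := by
      by_cases hin : v + 2 * k ∈ L
      · by_cases hinv : v + 2 * k ∈ v :: rest
        · exact Hlow0 _ hinv
        · exact absurd (hclosed (v + 2 * k) hin hinv v List.mem_cons_self) (by omega)
      · exact HlowL _ hin
    have hq : cnt.getD (v + 2 * k) 0 = (L.count (v + 2 * k) : Int) := by
      have := Hcnt (v + 2 * k)
      rw [show v + 2 * k - 2 * k = v by ring, hlowv, hl2] at this
      omega
    have hvk : v + 2 * k ≠ v := by omega
    have ha0 : 0 ≤ cnt.getD v 0 := Hpos v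
    rw [List.flatMap_cons,
        pvCheckB_block L k v _ hvk (L.count v) cnt ans ha0 (by rw [hcv]; omega) (Hpos _)]
    -- right-hand side unfolds
    have hlv : (PySem.Dict.counter L).getD v 0 - low.getD (v - 2 * k) 0 = cnt.getD v 0 := by
      rw [PySem.Dict.getD_counter, hcv]
    simp only [pvLowsB, PySem.Dict.getD_counter]
    set a := cnt.getD v 0 with hadef
    have hlva : (L.count v : Int) - low.getD (v - 2 * k) 0 = a := by rw [hcv]
    rw [hlva]
    by_cases hfail : cnt.getD (v + 2 * k) 0 < a
    · rw [if_pos hfail]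
      have hapos : 0 < a := by omega
      by_cases hin : v + 2 * k ∈ L
      · have hcontains : (PySem.Dict.counter L).contains (v + 2 * k) = true := by
          rw [PySem.Dict.contains_counter, List.contains_eq_mem]
          simp [hin]
        rw [if_neg (by
          push_neg
          refine ⟨by omega, fun h => ?_⟩
          intro hfalse; rw [hcontains] at hfalse; exact absurd hfalse (by simp))]
        have hwin : v + 2 * k ∈ rest := by
          by_cases hinv : v + 2 * k ∈ v :: rest
          · rcases List.mem_cons.mp hinv with h | h
            · exact absurd h (by omega)
            · exact h
          · exact absurd (hclosed (v + 2 * k) hin hinv v List.mem_cons_self) (by omega)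
        refine (pvLowsB_deficit _ k rest _ _ (v + 2 * k) hwin ?_ ?_).symm
        · rw [show v + 2 * k - 2 * k = v by ring]; exact hvrest
        · rw [show v + 2 * k - 2 * k = v by ring, PySem.Dict.getD_insert, if_pos rfl,
              PySem.Dict.getD_counter]
          omega
      · have hcnt0 : L.count (v + 2 * k) = 0 := List.count_eq_zero.mpr hin
        have hcontains : (PySem.Dict.counter L).contains (v + 2 * k) = false := by
          rw [PySem.Dict.contains_counter, List.contains_eq_mem]
          simp [hin]
        rw [if_pos (Or.inr ⟨by omega, hcontains⟩)]
    · rw [if_neg hfail]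
      have hcond : ¬ (a < 0 ∨ (0 < a ∧ (PySem.Dict.counter L).contains (v + 2 * k) = false)) := by
        push_neg
        refine ⟨by omega, fun hapos => ?_⟩
        have hin : v + 2 * k ∈ L := by
          rw [hq] at hfail
          have : 0 < L.count (v + 2 * k) := by omega
          exact List.count_pos_iff.mp this
        rw [PySem.Dict.contains_counter, List.contains_eq_mem]
        simp [hin]
      rw [if_neg hcond]
      have hwin : 0 < a → v + 2 * k ∈ rest := by
        intro hapos
        have hin : v + 2 * k ∈ L := by
          rw [hq] at hfail
          exact List.count_pos_iff.mp (by omega)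
        by_cases hinv : v + 2 * k ∈ v :: rest
        · rcases List.mem_cons.mp hinv with h | h
          · exact absurd h (by omega)
          · exact h
        · exact absurd (hclosed (v + 2 * k) hin hinv v List.mem_cons_self) (by omega)
      refine ih _ _ _ ?_ ?_ ?_ ?_ ?_ ?_ ?_ ?_ ?_
      · exact (List.pairwise_cons.mp hchain).2
      · exact fun w hw => hmem w (List.mem_cons_of_mem _ hw)
      · intro u hu hunr w hw
        by_cases huv : u = v
        · subst huv; exact hvlt w hw
        · refine hclosed u hu ?_ w (List.mem_cons_of_mem _ hw)
          intro hmem'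
          rcases List.mem_cons.mp hmem' with h' | h'
          · exact huv h'
          · exact hunr h'
      · intro w
        simp only [PySem.Dict.getD_insert]
        by_cases hw1 : w = v + 2 * k
        · subst hw1
          have e : v + 2 * k - 2 * k = v := by ring
          rw [e, if_pos rfl, if_pos rfl, if_neg hvk, hl2]
          omega
        · rw [if_neg hw1]
          by_cases hw2 : w = v
          · rw [hw2]
            have e : ¬ v - 2 * k = v := by omega
            rw [if_pos rfl, if_neg e, if_pos rfl]
            omega
          · have hw3 : ¬ w - 2 * k = v := fun h => hw1 (by omega)
            rw [if_neg hw2, if_neg hw3, if_neg hw2]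
            exact Hcnt w
      · intro w
        simp only [PySem.Dict.getD_insert]
        split_ifs with h1 h2
        · omega
        · omega
        · exact Hpos w
      · intro w hw
        have hne : ¬ w = v := by intro h; subst h; exact hvrest hw
        rw [PySem.Dict.getD_insert, if_neg hne]
        exact Hlow0 w (List.mem_cons_of_mem _ hw)
      · intro w hw
        have hne : ¬ w = v := by intro h; subst h; exact hw hvL
        rw [PySem.Dict.getD_insert, if_neg hne]
        exact HlowL w hw
      · intro w
        rw [PySem.Dict.getD_insert]
        split_ifs
        · omega
        · exact Hlownn w
      · -- length bookkeeping
        rw [List.flatMap_cons, List.length_append, List.length_replicate, List.map_cons,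
            List.sum_cons] at Hlen
        have hshift := pvSumShift k v a low rest
        rw [hlowv] at hshift
        have hnodup : rest.Nodup :=
          ((List.pairwise_cons.mp hchain).2.imp (fun h => ne_of_lt h))
        have hcast : ((a.toNat : Nat) : Int) = a := Int.toNat_of_nonneg ha0
        rw [List.length_append, List.length_replicate, hshift]
        by_cases hapos : 0 < a
        · have hone : rest.count (v + 2 * k) = 1 :=
            List.count_eq_one_of_mem hnodup (hwin hapos)
          rw [hone]
          push_cast
          omega
        · have haz : a = 0 := by omega
          have hzn : a.toNat = 0 := by omega
          rw [hzn, haz]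
          push_cast
          omega

-- distinct ascending values of a sorted list, with their multiplicities, flatten back to the list
theorem pvOfListFilter (p : Int → Bool) :
    ∀ (l : List Int), PySem.Set.ofList (l.filter p) = (PySem.Set.ofList l).filter p := by
  intro l
  induction l with
  | nil => rfl
  | cons x t ih =>
    by_cases px : p x = true
    · rw [List.filter_cons_of_pos px, PySem.Set.ofList_cons, PySem.Set.ofList_cons, ih]
      simp only [PySem.Set.discard, List.filter_cons_of_pos px, List.filter_filter]
      congr 1
      apply List.filter_congr
      intro y _
      rw [Bool.and_comm]
    · rw [List.filter_cons_of_neg px, PySem.Set.ofList_cons, ih]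
      simp only [PySem.Set.discard, List.filter_cons_of_neg px, List.filter_filter]
      apply List.filter_congr
      intro y _
      by_cases hy : y = x
      · subst hy; simp [px]
      · simp [hy]

theorem pvSortedGroup : ∀ (L : List Int), L.Pairwise (· ≤ ·) → ∀ (v : Int), (∀ x ∈ L, v ≤ x) →
    L = List.replicate (L.count v) v ++ L.filter (fun x => !(x == v)) := by
  intro L
  induction L with
  | nil => intro _ v _; rfl
  | cons x t ih =>
    intro hs v hv
    obtain ⟨hx, ht⟩ := List.pairwise_cons.mp hs
    by_cases hxv : x = v
    · subst hxv
      rw [List.count_cons_self, List.replicate_succ, List.filter_cons_of_neg (by simp)]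
      simpa using ih ht x (fun y hy => hx y hy)
    · have hvx : v < x := lt_of_le_of_ne (hv x List.mem_cons_self) (fun h => hxv h.symm)
      have hnv : v ∉ x :: t := by
        intro h
        rcases List.mem_cons.mp h with h | h
        · exact hxv h.symm
        · exact absurd (hx v h) (by omega)
      rw [List.count_eq_zero.mpr hnv, List.replicate_zero, List.nil_append,
          List.filter_eq_self.mpr]
      intro y hy
      rcases List.mem_cons.mp hy with h | h
      · subst h; simp [hxv]
      · have hxy := hx y h
        have : y ≠ v := by omega
        simp [this]

-- flatMap congruence on members (tiny helper)
theorem pvFlatMapCongr {α β : Type} (l : List α) (f g : α → List β)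
    (h : ∀ a ∈ l, f a = g a) : l.flatMap f = l.flatMap g := by
  induction l with
  | nil => rfl
  | cons x t ih =>
    rw [List.flatMap_cons, List.flatMap_cons, h x List.mem_cons_self,
        ih (fun a ha => h a (List.mem_cons_of_mem _ ha))]

theorem pvSortedFlatAux : ∀ (n : Nat) (L : List Int), L.length ≤ n → L.Pairwise (· ≤ ·) →
    (PySem.Set.ofList L).flatMap (fun v => List.replicate (L.count v) v) = L := by
  intro n
  induction n with
  | zero =>
    intro L hlen _
    have : L = [] := List.eq_nil_of_length_eq_zero (by omega)
    subst this; rfl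
  | succ n ih =>
    intro L hlen hs
    match L with
    | [] => rfl
    | x :: t =>
      set R := (x :: t).filter (fun y => !(y == x)) with hRdef
      have hgroup := pvSortedGroup (x :: t) hs x (fun y hy => by
        rcases List.mem_cons.mp hy with h | h
        · omega
        · exact (List.pairwise_cons.mp hs).1 y h)
      have hofl : PySem.Set.ofList (x :: t) = x :: PySem.Set.ofList R := by
        rw [PySem.Set.ofList_cons]
        simp only [PySem.Set.discard]
        rw [hRdef, List.filter_cons_of_neg (by simp), pvOfListFilter]
      have hcount : ∀ w ∈ PySem.Set.ofList R, (x :: t).count w = R.count w := by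
        intro w hw
        have hwR : w ∈ R := (PySem.Set.mem_ofList _ _).mp hw
        have hwx : w ≠ x := by simpa using List.of_mem_filter hwR
        conv_lhs => rw [hgroup]
        rw [List.count_append, List.count_replicate, if_neg (by simp; exact fun h => hwx h.symm),
            Nat.zero_add, hRdef]
      have hcx : 0 < (x :: t).count x := List.count_pos_iff.mpr List.mem_cons_self
      have hRlen : R.length ≤ n := by
        have : (x :: t).length = (x :: t).count x + R.length := by
          conv_lhs => rw [hgroup]
          rw [List.length_append, List.length_replicate]
        omega
      have hRs : R.Pairwise (· ≤ ·) := hs.sublist (List.filter_sublist)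
      rw [hofl, List.flatMap_cons]
      have hmapeq : (PySem.Set.ofList R).flatMap (fun v => List.replicate ((x :: t).count v) v)
          = (PySem.Set.ofList R).flatMap (fun v => List.replicate (R.count v) v) := by
        exact pvFlatMapCongr _ _ _ (fun a ha => by rw [hcount a ha])
      rw [hmapeq, ih R hRlen hRs]
      conv_rhs => rw [hgroup]

theorem pvOfListSublist : ∀ (l : List Int), (PySem.Set.ofList l).Sublist l := by
  intro l
  induction l with
  | nil => exact List.Sublist.refl _
  | cons x t ih =>
    rw [PySem.Set.ofList_cons]
    exact List.Sublist.cons₂ x ((List.filter_sublist).trans ih)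

theorem pvOfListChain (L : List Int) (hs : L.Pairwise (· ≤ ·)) :
    (PySem.Set.ofList L).Pairwise (· < ·) := by
  have h1 : (PySem.Set.ofList L).Pairwise (· ≤ ·) := hs.sublist (pvOfListSublist L)
  have h2 : (PySem.Set.ofList L).Nodup := PySem.Set.nodup_ofList L
  have := h1.and h2
  exact this.imp (fun h => lt_of_le_of_ne h.1 h.2)

theorem pvSortedFlat (L : List Int) (hs : L.Pairwise (· ≤ ·)) :
    (PySem.Set.ofList L).flatMap (fun v => List.replicate (L.count v) v) = L :=
  pvSortedFlatAux L.length L (le_refl _) hs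

theorem pvCheckEq (L : List Int) (hs : L.Pairwise (· ≤ ·)) (k : Int) (hk : 1 ≤ k) :
    pvCheckB L k L (PySem.Dict.counter L) []
      = pvLowsB (PySem.Dict.counter L) k (PySem.Set.ofList L) PySem.Dict.empty [] := by
  have h := pvMain L k hk (PySem.Set.ofList L) (PySem.Dict.counter L) PySem.Dict.empty []
    (pvOfListChain L hs)
    (fun v hv => (PySem.Set.mem_ofList _ _).mp hv)
    (fun u hu hun _ _ => absurd ((PySem.Set.mem_ofList _ _).mpr hu) hun)
    ?_ ?_ ?_ ?_ ?_ ?_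
  · rw [pvSortedFlat L hs] at h
    exact h
  · intro w; simp [PySem.Dict.getD_counter, PySem.Dict.getD_empty]
  · intro w; simp [PySem.Dict.getD_counter]
  · intro w _; simp [PySem.Dict.getD_empty]
  · intro w _; simp [PySem.Dict.getD_empty]
  · intro w; simp [PySem.Dict.getD_empty]
  · rw [pvSortedFlat L hs]
    simp [PySem.Dict.getD_empty]

-- ===== candidate loops =====

-- A's candidate loop rewritten over the candidate VALUES instead of the indices
def pvValsLoop (L : List Int) : List Int → Option (List Int)
  | [] => none
  | v :: rest =>
    let d := v - PySem.List.pyGetD L 0 0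
    if PySem.Int.mod d 2 = 1 ∨ d < 2 then pvValsLoop L rest
    else
      match pvCheckB L (PySem.Int.floordiv d 2) L (PySem.Dict.counter L) [] with
      | some a => some a
      | none => pvValsLoop L rest

theorem pvLoopB_eq_vals (L : List Int) :
    ∀ (is : List Int), pvLoopB L is = pvValsLoop L (is.map (fun i => PySem.List.pyGetD L i 0)) := by
  intro is
  induction is with
  | nil => rfl
  | cons i rest ih =>
    simp only [pvLoopB, pvValsLoop, List.map_cons]
    split_ifs with h
    · exact ih
    · cases pvCheckB L (PySem.Int.floordiv (PySem.List.pyGetD L i 0 - PySem.List.pyGetD L 0 0) 2)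
          L (PySem.Dict.counter L) [] with
      | some a => rfl
      | none => exact ih

theorem pvValsLoop_skip (L : List Int) (v : Int) (r : List Int)
    (h : PySem.Int.mod (v - PySem.List.pyGetD L 0 0) 2 = 1 ∨ v - PySem.List.pyGetD L 0 0 < 2) :
    pvValsLoop L (v :: r) = pvValsLoop L r := by
  simp only [pvValsLoop, if_pos h]

theorem pvValsLoop_replicate (L : List Int) (v : Int) :
    ∀ (m : Nat) (r : List Int), 1 ≤ m →
      pvValsLoop L (List.replicate m v ++ r) = pvValsLoop L (v :: r) := by
  intro m
  induction m with
  | zero => intro r h; omega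
  | succ m ih =>
    intro r _
    by_cases hm : m = 0
    · subst hm; rfl
    · rw [List.replicate_succ, List.cons_append]
      have ihm := ih r (by omega)
      simp only [pvValsLoop]
      split_ifs with h
      · rw [← pvValsLoop_skip L v r h, ← ihm]
      · cases hres : pvCheckB L (PySem.Int.floordiv (v - PySem.List.pyGetD L 0 0) 2)
            L (PySem.Dict.counter L) [] with
        | some a => rfl
        | none =>
          rw [ihm]
          simp only [pvValsLoop, if_neg h, hres]

-- the map over range(1, n//2+1) is a take of a drop
theorem pvMapRange (L : List Int) :
    ∀ (len a : Nat), a + len ≤ L.length →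
      (PySem.List.pyRange (a : Int) ((a : Int) + (len : Int)) 1).map
          (fun i => PySem.List.pyGetD L i 0)
        = (L.drop a).take len := by
  intro len
  induction len with
  | zero =>
    intro a _
    rw [PySem.List.pyRange_one_eq_nil (by omega)]
    simp
  | succ len ih =>
    intro a hle
    rw [PySem.List.pyRange_one_cons (by omega), List.map_cons]
    have ha : a < L.length := by omega
    have hget : PySem.List.pyGetD L (a : Int) 0 = L[a] := by
      rw [PySem.List.pyGetD_natCast, List.getD_eq_getElem _ _ ha]
    have htail : ((a : Int) + 1) = ((a + 1 : Nat) : Int) := by push_cast; ring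
    have htail2 : (a : Int) + ((len + 1 : Nat) : Int) = ((a + 1 : Nat) : Int) + (len : Int) := by
      push_cast; ring
    rw [hget, htail, htail2, ih (a + 1) (by omega)]
    rw [List.drop_eq_getElem_cons ha]
    rfl

-- the run-window induction: A's truncated value list against B's deduplicated loop
theorem pvE4gen (L : List Int) (hs : L.Pairwise (· ≤ ·)) :
    ∀ (vals' : List Int) (pos : Int),
      vals'.Pairwise (· < ·) →
      (∀ v ∈ vals', v ∈ L) →
      0 ≤ pos →
      pvValsLoop L ((vals'.flatMap (fun v => List.replicate (L.count v) v)).take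
          ((PySem.Int.floordiv (L.length : Int) 2 + 1 - pos).toNat))
        = pvCandB L (PySem.Dict.counter L) (PySem.Set.ofList L) vals' pos := by
  have hfd : PySem.Int.floordiv (L.length : Int) 2 = (L.length : Int) / 2 :=
    PySem.Int.floordiv_eq_ediv_of_pos (by norm_num)
  intro vals'
  induction vals' with
  | nil =>
    intro pos _ _ _
    simp only [List.flatMap_nil, List.take_nil]
    rfl
  | cons v rest ih =>
    intro pos hchain hmem hpos
    have hvL : v ∈ L := hmem v List.mem_cons_self
    have hc1 : 1 ≤ L.count v := List.count_pos_iff.mpr hvL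
    have hh2nn : 0 ≤ PySem.Int.floordiv (L.length : Int) 2 := by rw [hfd]; omega
    simp only [pvCandB]
    by_cases hbr : pos > PySem.Int.floordiv (L.length : Int) 2
    · rw [if_pos hbr]
      have hz : (PySem.Int.floordiv (L.length : Int) 2 + 1 - pos).toNat = 0 := by
        rw [hfd] at hbr ⊢; omega
      rw [hz, List.take_zero]
      rfl
    · rw [if_neg hbr]
      have ht1 : 1 ≤ (PySem.Int.floordiv (L.length : Int) 2 + 1 - pos).toNat := by
        rw [hfd] at hbr ⊢; omega
      rw [List.flatMap_cons, List.take_append, List.take_replicate, List.length_replicate]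
      have hmin : 1 ≤ min ((PySem.Int.floordiv (L.length : Int) 2 + 1 - pos).toNat) (L.count v) := by
        omega
      rw [pvValsLoop_replicate L v _ _ hmin]
      have hcnt : (PySem.Dict.counter L).getD v 0 = (L.count v : Int) :=
        PySem.Dict.getD_counter L v
      have hposeq : (PySem.Int.floordiv (L.length : Int) 2 + 1 - pos).toNat - L.count v
          = (PySem.Int.floordiv (L.length : Int) 2 + 1 - (pos + (L.count v : Int))).toNat := by
        rw [hfd] at ht1 ⊢; omega
      by_cases hg : PySem.Int.mod (v - PySem.List.pyGetD L 0 0) 2 = 1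
          ∨ v - PySem.List.pyGetD L 0 0 < 2
      · rw [pvValsLoop_skip L v _ hg, if_pos hg, hcnt, hposeq]
        exact ih (pos + (L.count v : Int)) (List.pairwise_cons.mp hchain).2
          (fun w hw => hmem w (List.mem_cons_of_mem _ hw)) (by omega)
      · rw [if_neg hg]
        have hk1 : 1 ≤ PySem.Int.floordiv (v - PySem.List.pyGetD L 0 0) 2 := by
          rw [PySem.Int.floordiv_eq_ediv_of_pos (by norm_num)]
          push_neg at hg
          rw [PySem.Int.mod_eq_emod_of_pos (by norm_num)] at hg
          omega
        simp only [pvValsLoop]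
        rw [if_neg hg, pvCheckEq L hs _ hk1, hcnt, hposeq]
        cases pvLowsB (PySem.Dict.counter L) (PySem.Int.floordiv (v - PySem.List.pyGetD L 0 0) 2)
            (PySem.Set.ofList L) PySem.Dict.empty [] with
        | some a => rfl
        | none =>
          exact ih (pos + (L.count v : Int)) (List.pairwise_cons.mp hchain).2
            (fun w hw => hmem w (List.mem_cons_of_mem _ hw)) (by omega)

-- ===== VERDICT (by name: the statement is the Claim_ definition above) =====
theorem pvKey : ∀ (L : List Int), L.Pairwise (· ≤ ·) →
    pvLoopA L (pvBuildNh L) (PySem.List.pyRange 1 ((L.length / 2 + 1 : Nat) : Int) 1)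
      = pvCandB L (PySem.Dict.counter L) (PySem.Set.ofList L) (PySem.Set.ofList L) 0 := by
  intro L hs
  rw [pvLoop_eq, pvLoopB_eq_vals]
  cases L with
  | nil => rfl
  | cons v0 t =>
    have hmain := pvE4gen (v0 :: t) hs (PySem.Set.ofList (v0 :: t)) 0 (pvOfListChain _ hs)
      (fun v hv => (PySem.Set.mem_ofList _ _).mp hv) (le_refl 0)
    rw [pvSortedFlat _ hs] at hmain
    have htn : (PySem.Int.floordiv ((v0 :: t).length : Int) 2 + 1 - 0).toNat
        = (v0 :: t).length / 2 + 1 := by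
      rw [PySem.Int.floordiv_eq_ediv_of_pos (by norm_num)]
      omega
    rw [htn] at hmain
    have hmr := pvMapRange (v0 :: t) ((v0 :: t).length / 2) 1 (by simp; omega)
    simp only [Nat.cast_one] at hmr
    have hcast : (((v0 :: t).length / 2 + 1 : Nat) : Int)
        = (1 : Int) + (((v0 :: t).length / 2 : Nat) : Int) := by push_cast; ring
    rw [hcast, hmr]
    have hdrop : ((v0 :: t).drop 1).take ((v0 :: t).length / 2)
        = t.take ((v0 :: t).length / 2) := rfl
    have htake : (v0 :: t).take ((v0 :: t).length / 2 + 1)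
        = v0 :: t.take ((v0 :: t).length / 2) := rfl
    have hskip : pvValsLoop (v0 :: t) (v0 :: t.take ((v0 :: t).length / 2))
        = pvValsLoop (v0 :: t) (t.take ((v0 :: t).length / 2)) := by
      apply pvValsLoop_skip
      right
      rw [PySem.List.pyGetD_zero_cons]
      omega
    rw [hdrop, ← hskip, ← htake]
    exact hmain

theorem recoverArray_spec : Claim_equal_recoverArray := by
  intro nums _
  show recoverArray nums = recoverArray_alt nums
  have hs : (PySem.List.sorted nums (fun x => x) false).Pairwise (· ≤ ·) :=
    PySem.List.sorted_pairwise nums (fun x => x)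
  have hB : recoverArray_alt nums
      = pvCandB (PySem.List.sorted nums (fun x => x) false)
          (PySem.Dict.counter (PySem.List.sorted nums (fun x => x) false))
          (PySem.Dict.counter (PySem.List.sorted nums (fun x => x) false)).keys
          (PySem.Dict.counter (PySem.List.sorted nums (fun x => x) false)).keys 0 := by
    show recoverArray_alt nums = _
    rw [recoverArray_alt, ← PySem.Dict.foldl_insert_getD_add_one_eq_counter]
  rw [hB, PySem.Dict.keys_counter]
  exact pvKey (PySem.List.sorted nums (fun x => x) false) hs
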